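-- pv_equiv track=rewrite | github.com/Strilanc/quantum-karatsuba-2019 | kara.py | scatter
-- ===== SOURCE A (Python) =====
-- def scatter(bits: int, mask: int) -> int:
--     t = 0
--     while mask:
--         new_mask = mask & (mask - 1)
--         out = new_mask ^ mask
--         if bits & 1:
--             t |= out
--         bits >>= 1
--         mask = new_mask
--     return t
-- ===== SOURCE B (Python) =====
-- def scatter(bits: int, mask: int) -> int:
--     t = 0
--     i = 0
--     while mask >> i:
--         if (mask >> i) & 1:
--             if bits & 1:
--                 t |= 1 << i
--             bits >>= 1
--         i += 1
--     return t
-- ===== Notes on version B (the rewrite author's own statement) =====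
-- stated objective: alternative
-- what changed: B scans every bit position i of mask from the low end (testing (mask>>i)&1 and depositing 1<<i), instead of A's repeated isolation of the lowest set bit via mask&(mask-1); traversal is O(bit_length) positions vs O(popcount) jumps.
import Mathlib
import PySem

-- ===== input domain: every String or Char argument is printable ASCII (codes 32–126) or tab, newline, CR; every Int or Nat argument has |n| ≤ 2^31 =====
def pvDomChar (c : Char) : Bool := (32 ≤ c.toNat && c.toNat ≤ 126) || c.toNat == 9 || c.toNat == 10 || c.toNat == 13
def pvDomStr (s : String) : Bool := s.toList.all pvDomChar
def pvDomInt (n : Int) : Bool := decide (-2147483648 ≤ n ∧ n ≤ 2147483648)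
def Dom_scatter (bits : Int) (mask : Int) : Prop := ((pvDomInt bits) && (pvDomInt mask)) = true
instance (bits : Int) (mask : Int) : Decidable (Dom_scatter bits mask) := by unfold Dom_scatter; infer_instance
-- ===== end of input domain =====

-- B scans every bit position of mask from the low end instead of A's repeated
-- lowest-set-bit isolation via mask & (mask-1); alternative decomposition, same cost class.


-- ===== PORT A =====
-- while mask: new_mask = mask & (mask-1); out = new_mask ^ mask; if bits & 1: t |= out; bits >>= 1; mask = new_mask
-- The `mask < 0` guard only makes the recursion total: Python loops forever there (excluded by Pre_).
def scatterAux (t bits mask : Int) : Int :=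
  if mask = 0 then t
  else if mask < 0 then 0
  else
    let new_mask := PySem.Int.band mask (mask - 1)
    let out := PySem.Int.bxor new_mask mask
    scatterAux (if PySem.Int.band bits 1 ≠ 0 then PySem.Int.bor t out else t) (bits >>> 1) new_mask
termination_by mask.toNat
decreasing_by
  have h0 : 0 < mask := by omega
  have h1 : PySem.Int.band mask (mask - 1) = ((mask.toNat &&& (mask.toNat - 1) : Nat) : Int) := by
    have := PySem.Int.band_of_nonneg (a := mask) (b := mask - 1) (by omega) (by omega)
    simpa [Int.toNat_sub' mask 1] using this
  have h2 : mask.toNat &&& (mask.toNat - 1) ≤ mask.toNat - 1 := Nat.and_le_right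
  simp only [h1]
  omega

def scatter (bits : Int) (mask : Int) : Int := scatterAux 0 bits mask

-- ===== PORT B =====
-- while mask >> i: if (mask >> i) & 1: (if bits & 1: t |= 1 << i); bits >>= 1; i += 1
-- The `mask < 0` guard only makes the recursion total: Python loops forever there (excluded by Pre_).
lemma pvShiftRight_cast (mask : Int) (h : 0 ≤ mask) (i : Nat) :
    mask >>> i = ((mask.toNat >>> i : Nat) : Int) := by
  conv_lhs => rw [← Int.toNat_of_nonneg h]
  rw [Int.natCast_shiftRight]

def scatterAltAux (t bits mask : Int) (i : Nat) : Int :=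
  if mask >>> i = 0 then t
  else if mask < 0 then 0
  else if PySem.Int.band (mask >>> i) 1 ≠ 0 then
    scatterAltAux (if PySem.Int.band bits 1 ≠ 0 then PySem.Int.bor t ((1 : Int) <<< i) else t)
      (bits >>> 1) mask (i + 1)
  else scatterAltAux t bits mask (i + 1)
termination_by (mask >>> i).toNat
decreasing_by
  all_goals {
    have h0 : 0 ≤ mask := by omega
    have hc : (mask >>> i) = ((mask.toNat >>> i : Nat) : Int) := pvShiftRight_cast mask h0 i
    have hc1 : (mask >>> (i + 1)) = ((mask.toNat >>> (i + 1) : Nat) : Int) := pvShiftRight_cast mask h0 (i + 1)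
    have hp : mask.toNat >>> i ≠ 0 := by
      intro h; apply ‹¬ mask >>> i = 0›; rw [hc, h]; rfl
    have hstep : mask.toNat >>> (i + 1) = (mask.toNat >>> i) / 2 := by
      rw [Nat.shiftRight_add]; rfl
    rw [hc, hc1]
    simp only [Int.toNat_natCast]
    rw [hstep]
    exact Nat.div_lt_self (Nat.pos_of_ne_zero hp) (by norm_num)
  }

def scatter_alt (bits : Int) (mask : Int) : Int := scatterAltAux 0 bits mask 0

-- ===== PRECONDITION & SPEC =====
-- Pre_ excludes mask < 0, where Python's A (and B) loop forever (no return).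
def Pre_scatter (bits : Int) (mask : Int) : Prop := 0 ≤ mask
instance (bits : Int) (mask : Int) : Decidable (Pre_scatter bits mask) := by unfold Pre_scatter; infer_instance
def pvWitness_scatter : Int × Int := (3, 10)
def Spec_scatter (bits : Int) (mask : Int) (out : Int) : Prop := out = scatter_alt bits mask
instance (bits : Int) (mask : Int) (out : Int) : Decidable (Spec_scatter bits mask out) := by unfold Spec_scatter; infer_instance

-- ===== CLAIM (what is proved, stated in full; the proofs are below) =====
def Claim_equal_scatter : Prop := ∀ (bits : Int) (mask : Int), Dom_scatter bits mask → Pre_scatter bits mask → Spec_scatter bits mask (scatter bits mask)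

-- ===== LEMMAS AND PROOFS =====

-- Key bit facts on Nat: isolating the lowest set bit of an odd number shifted left by i.

lemma nk1 (k i : Nat) : ((2 * k + 1) <<< i) &&& ((2 * k + 1) <<< i - 1) = k <<< (i + 1) := by
  have hpow : 0 < 2 ^ i := Nat.two_pow_pos i
  have hsub : (2 * k + 1) <<< i - 1 = 2 ^ (i+1) * k + (2 ^ i - 1) := by
    simp only [Nat.shiftLeft_eq]
    ring_nf
    omega
  apply Nat.eq_of_testBit_eq
  intro j
  rw [Nat.testBit_and, hsub,
    Nat.testBit_two_pow_mul_add _ (by omega),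
    Nat.testBit_shiftLeft, Nat.testBit_shiftLeft]
  rcases lt_trichotomy j i with h | h | h
  · have h1 : ¬ i ≤ j := by omega
    have h2 : ¬ i + 1 ≤ j := by omega
    simp [h1, h2]
  · subst h
    have h2 : ¬ j + 1 ≤ j := by omega
    simp [h2, Nat.testBit_two_pow_sub_one]
  · have h1 : ¬ j < i + 1 := by omega
    have h2 : i ≤ j := by omega
    have h3 : i + 1 ≤ j := by omega
    simp only [h1, if_false, ge_iff_le, h2, h3, decide_true, Bool.true_and]
    have ht : (2 * k + 1).testBit (j - i) = k.testBit (j - i - 1) := by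
      have hj : j - i = (j - i - 1) + 1 := by omega
      rw [hj, Nat.testBit_add_one]
      congr 1
      omega
    have h4 : j - (i + 1) = j - i - 1 := by omega
    rw [ht, h4, Bool.and_self]

lemma nk2 (k i : Nat) : (k <<< (i + 1)) ^^^ ((2 * k + 1) <<< i) = 1 <<< i := by
  apply Nat.eq_of_testBit_eq
  intro j
  rw [Nat.testBit_xor, Nat.testBit_shiftLeft, Nat.testBit_shiftLeft, Nat.testBit_shiftLeft]
  rcases lt_trichotomy j i with h | h | h
  · have h1 : ¬ i ≤ j := by omega
    have h2 : ¬ i + 1 ≤ j := by omega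
    simp [h1, h2]
  · subst h
    have h2 : ¬ j + 1 ≤ j := by omega
    simp [h2]
  · have h2 : i ≤ j := by omega
    have h3 : i + 1 ≤ j := by omega
    simp only [ge_iff_le, h2, h3, decide_true, Bool.true_and]
    have ht : (2 * k + 1).testBit (j - i) = k.testBit (j - i - 1) := by
      have hj : j - i = (j - i - 1) + 1 := by omega
      rw [hj, Nat.testBit_add_one]
      congr 1
      omega
    have h4 : j - (i + 1) = j - i - 1 := by omega
    have h5 : (1 : Nat).testBit (j - i) = false := by
      have hj : j - i = (j - i - 1) + 1 := by omega
      rw [hj, Nat.testBit_add_one]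
      simp
    rw [ht, h4, h5, Bool.xor_self]

lemma main_lemma (mask : Int) (h0 : 0 ≤ mask) :
    ∀ (n : Nat) (t bits : Int) (i : Nat), (mask >>> i).toNat = n →
      scatterAux t bits ((mask >>> i) <<< i) = scatterAltAux t bits mask i := by
  intro n
  induction n using Nat.strong_induction_on with
  | _ n ih =>
    intro t bits i hn
    have hm : ¬ mask < 0 := by omega
    have hc : mask >>> i = ((mask.toNat >>> i : Nat) : Int) := pvShiftRight_cast mask h0 i
    have hc1 : mask >>> (i + 1) = ((mask.toNat >>> (i + 1) : Nat) : Int) :=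
      pvShiftRight_cast mask h0 (i + 1)
    set p := mask.toNat >>> i with hpdef
    have hstep : mask.toNat >>> (i + 1) = p / 2 := by
      rw [Nat.shiftRight_add]; rfl
    have hnp : p = n := by rw [hc] at hn; simpa using hn
    by_cases hz : p = 0
    · -- loop guard false on both sides
      rw [hc, hz]
      rw [scatterAux, scatterAltAux]
      simp [hc, hz]
    · have hq : (mask >>> (i + 1)).toNat = p / 2 := by rw [hc1, Int.toNat_natCast]; exact hstep
      have hlt : p / 2 < n := by omega
      have ihx := ih (p / 2) hlt
      have hcastL : (mask >>> i) <<< i = (((p <<< i : Nat) : Nat) : Int) := by rw [hc]; rfl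
      have hcastL1 : (mask >>> (i + 1)) <<< (i + 1) = (((p / 2) <<< (i + 1) : Nat) : Int) := by
        rw [hc1, hstep]; rfl
      have hguard : ¬ mask >>> i = 0 := by
        rw [hc]; exact_mod_cast hz
      have hband1 : PySem.Int.band (mask >>> i) 1 = ((p % 2 : Nat) : Int) := by
        rw [hc]
        have : ((1 : Nat) : Int) = (1 : Int) := rfl
        rw [← this, PySem.Int.band_natCast, Nat.and_one_is_mod]
      by_cases hpar : p % 2 = 0
      · -- even: A's state is unchanged, B skips the position
        have hsh : p <<< i = (p / 2) <<< (i + 1) := by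
          simp only [Nat.shiftLeft_eq, pow_succ]
          have he : p = 2 * (p / 2) := by omega
          calc p * 2 ^ i = (2 * (p / 2)) * 2 ^ i := by rw [← he]
            _ = p / 2 * (2 ^ i * 2) := by ring
        rw [scatterAltAux]
        simp only [hguard, if_false, hm, hband1, hpar]
        simp only [Nat.cast_zero, ne_eq, not_true_eq_false, if_false]
        rw [hcastL, hsh, ← hcastL1]
        exact ihx t bits (i + 1) hq
      · -- odd: A strips the lowest set bit, located at position i
        have hpar1 : p % 2 = 1 := by omega
        set q := p / 2 with hqdef
        have hpe : p = 2 * q + 1 := by omega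
        have hMne : ¬ (((p <<< i : Nat) : Int)) = 0 := by
          have : p <<< i ≠ 0 := by
            simp only [Nat.shiftLeft_eq]
            have := Nat.two_pow_pos i
            positivity
          exact_mod_cast this
        have hMnn : ¬ (((p <<< i : Nat) : Int)) < 0 := not_lt.mpr (Int.natCast_nonneg _)
        have hM1 : (((p <<< i : Nat) : Int)) - 1 = ((p <<< i - 1 : Nat) : Int) := by
          have : p <<< i ≠ 0 := by exact_mod_cast hMne
          omega
        have hnm : PySem.Int.band (((p <<< i : Nat) : Int)) ((((p <<< i : Nat) : Int)) - 1)
            = ((q <<< (i + 1) : Nat) : Int) := by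
          rw [hM1, PySem.Int.band_natCast]
          rw [hpe, nk1]
        have hout : PySem.Int.bxor (((q <<< (i + 1) : Nat) : Int)) (((p <<< i : Nat) : Int))
            = (1 : Int) <<< i := by
          rw [PySem.Int.bxor_natCast, hpe, nk2]
          rfl
        rw [hcastL, scatterAux]
        simp only [hMne, if_false, hMnn, hnm, hout]
        rw [scatterAltAux]
        simp only [hguard, if_false, hm, hband1, hpar1]
        simp only [Nat.cast_one, ne_eq, one_ne_zero, not_false_eq_true, if_true]
        have hrw : ((q <<< (i + 1) : Nat) : Int) = (mask >>> (i + 1)) <<< (i + 1) := by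
          rw [hcastL1]
        rw [hrw]
        exact ihx _ (bits >>> 1) (i + 1) hq

-- ===== VERDICT (by name: the statement is the Claim_ definition above) =====
theorem scatter_spec : Claim_equal_scatter := by
  intro bits mask _ hpre
  unfold Spec_scatter scatter scatter_alt
  have h := main_lemma mask hpre (mask >>> (0:Nat)).toNat 0 bits 0 rfl
  simpa using h
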